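-- pv_equiv track=rewrite | github.com/YifanLi3/assignment1-basics | cs336_basics/train_bpe.py | get_pair_counts
-- ===== SOURCE A (Python) =====
-- from collections import Counter
--
-- def get_pair_counts(tokens: list[int]) -> Counter:
--     pairs = Counter()
--     for i in range(len(tokens) - 1):
--         # 跳过包含负数ID的pairs（特殊token占位符）
--         if tokens[i] < 0 or tokens[i+1] < 0:
--             continue
--         pair = (tokens[i], tokens[i+1])
--         pairs[pair] += 1
--     return pairs
-- ===== SOURCE B (Python) =====
-- from collections import Counter
-- from itertools import groupby
--
--
-- def get_pair_counts(tokens: list[int]) -> Counter: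
--     # Segment tokens into maximal runs of non-negative IDs (negatives are
--     # delimiters); count all adjacent pairs inside each run.
--     pairs = Counter()
--     for is_special, group in groupby(tokens, key=lambda t: t < 0):
--         if is_special:
--             continue
--         run = list(group)
--         pairs.update(zip(run, run[1:]))
--     return pairs
-- ===== Notes on version B (the rewrite author's own statement) =====
-- stated objective: alternative
-- what changed: B segments the tokens into maximal runs of non-negative IDs (negatives act as delimiters via itertools.groupby) and counts all adjacent pairs inside each run with Counter.update, removing the per-pair negativity test of A's index loop.
import Mathlib
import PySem

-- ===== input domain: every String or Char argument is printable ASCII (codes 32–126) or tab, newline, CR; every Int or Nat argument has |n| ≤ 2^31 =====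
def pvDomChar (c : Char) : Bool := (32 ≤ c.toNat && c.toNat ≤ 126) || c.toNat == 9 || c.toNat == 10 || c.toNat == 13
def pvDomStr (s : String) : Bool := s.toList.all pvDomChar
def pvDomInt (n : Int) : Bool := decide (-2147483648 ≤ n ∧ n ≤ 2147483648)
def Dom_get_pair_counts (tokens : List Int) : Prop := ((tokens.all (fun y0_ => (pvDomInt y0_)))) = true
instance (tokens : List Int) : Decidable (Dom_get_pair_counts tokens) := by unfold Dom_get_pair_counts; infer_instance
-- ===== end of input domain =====

-- B segments the tokens into maximal runs of non-negative IDs (negatives are delimiters, via groupby)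
-- and counts the adjacent pairs inside each run — same counts and insertion order as A's index loop.

-- ===== PORT A =====
-- A's loop body: read tokens[i], tokens[i+1] (both always in range here, so pyGetD is exact),
-- skip if either is negative, else pairs[(a, b)] += 1
def pvStepA (tokens : List Int) (d : PySem.Dict (Int × Int) Int) (i : Int) : PySem.Dict (Int × Int) Int :=
  let a := PySem.List.pyGetD tokens i 0
  let b := PySem.List.pyGetD tokens (i + 1) 0
  if a < 0 || b < 0 then d else d.modify (a, b) 0 (· + 1)

def get_pair_counts (tokens : List Int) : List (Int × Int × Int) :=
  -- for i in range(len(tokens) - 1): …  ; the Counter's items as flat (a, b, count) triples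
  let d := (PySem.List.pyRange 0 ((tokens.length : Int) - 1) 1).foldl (pvStepA tokens) PySem.Dict.empty
  d.items.map (fun p => (p.1.1, p.1.2, p.2))

-- ===== PORT B =====
-- pairs[(a, b)] += 1 (Counter.update counts each yielded key once)
def pvBump (d : PySem.Dict (Int × Int) Int) (p : Int × Int) : PySem.Dict (Int × Int) Int :=
  d.modify p 0 (· + 1)

-- groupby(tokens, key=lambda t: t < 0), keeping only the non-negative groups
def pvRuns : List Int → List (List Int)
  | [] => []
  | x :: xs =>
    if x < 0 then pvRuns xs
    else (x :: xs.takeWhile (fun t => !decide (t < 0))) :: pvRuns (xs.dropWhile (fun t => !decide (t < 0)))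
termination_by l => l.length
decreasing_by
  · simp
  · have := List.length_dropWhile_le (fun t => !decide (t < 0)) xs
    simp; omega

-- pairs.update(zip(run, run[1:]))  (run[1:] of a list is its tail)
def pvCountRun (d : PySem.Dict (Int × Int) Int) (run : List Int) : PySem.Dict (Int × Int) Int :=
  (run.zip run.tail).foldl pvBump d

def get_pair_counts_alt (tokens : List Int) : List (Int × Int × Int) :=
  let d := (pvRuns tokens).foldl pvCountRun PySem.Dict.empty
  d.items.map (fun p => (p.1.1, p.1.2, p.2))

-- ===== PRECONDITION & SPEC =====
def Spec_get_pair_counts (tokens : List Int) (out : List (Int × Int × Int)) : Prop := out = get_pair_counts_alt tokens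
instance (tokens : List Int) (out : List (Int × Int × Int)) : Decidable (Spec_get_pair_counts tokens out) := by unfold Spec_get_pair_counts; infer_instance

-- ===== CLAIM (what is proved, stated in full; the proofs are below) =====
def Claim_equal_get_pair_counts : Prop := ∀ (tokens : List Int), Dom_get_pair_counts tokens → Spec_get_pair_counts tokens (get_pair_counts tokens)

-- ===== LEMMAS AND PROOFS =====

-- the common intermediate: fold over the adjacent pairs, skipping pairs with a negative member
def pvStepP (d : PySem.Dict (Int × Int) Int) (p : Int × Int) : PySem.Dict (Int × Int) Int :=
  if p.1 < 0 || p.2 < 0 then d else pvBump d p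

-- shifting A's index loop past the head of the list
theorem pvShift (x : Int) (ys : List Int) (m : Nat) (d : PySem.Dict (Int × Int) Int) :
    (PySem.List.pyRange 1 ((m : Int) + 1) 1).foldl (pvStepA (x :: ys)) d
      = (PySem.List.pyRange 0 (m : Int) 1).foldl (pvStepA ys) d := by
  rw [PySem.List.pyRange_one, PySem.List.pyRange_one]
  have e1 : ((m : Int) + 1 - 1).toNat = m := by omega
  have e2 : ((m : Int) - 0).toNat = m := by omega
  rw [e1, e2, List.foldl_map, List.foldl_map]
  have hc : ∀ (z : Int) (zs : List Int) (j : Nat),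
      PySem.List.pyGetD (z :: zs) ((j : Int) + 1) 0 = PySem.List.pyGetD zs (j : Int) 0 := by
    intro z zs j
    have e : (j : Int) + 1 = ((j + 1 : Nat) : Int) := by push_cast; ring
    rw [e, PySem.List.pyGetD_natCast, PySem.List.pyGetD_natCast]
    simp
  have hf : (fun (d : PySem.Dict (Int × Int) Int) (k : Nat) => pvStepA (x :: ys) d (1 + (k : Int)))
      = (fun (d : PySem.Dict (Int × Int) Int) (k : Nat) => pvStepA ys d (0 + (k : Int))) := by
    funext d k
    have e1 : (1 : Int) + (k : Int) = (k : Int) + 1 := by ring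
    have e2 : (0 : Int) + (k : Int) = (k : Int) := by ring
    have e3 : (k : Int) + 1 + 1 = ((k + 1 : Nat) : Int) + 1 := by push_cast; ring
    have e4 : ((k + 1 : Nat) : Int) = (k : Int) + 1 := by push_cast; ring
    simp only [pvStepA, e1, e2, e3, hc x ys k, hc x ys (k + 1), e4]
  rw [hf]

-- A's index loop is the fold of pvStepP over the adjacent pairs
theorem pvA_loop (tokens : List Int) :
    ∀ d, (PySem.List.pyRange 0 ((tokens.length : Int) - 1) 1).foldl (pvStepA tokens) d
      = (tokens.zip tokens.tail).foldl pvStepP d := by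
  induction tokens with
  | nil => intro d; simp [PySem.List.pyRange]
  | cons x xs ih =>
    intro d
    cases xs with
    | nil => simp [PySem.List.pyRange]
    | cons y t =>
      have hb : (0 : Int) < ((x :: y :: t).length : Int) - 1 := by
        simp only [List.length_cons]; push_cast; omega
      rw [PySem.List.pyRange_one_cons hb]
      have hlen : ((x :: y :: t).length : Int) - 1 = ((t.length + 1 : Nat) : Int) := by
        simp only [List.length_cons]; push_cast; ring
      rw [List.foldl_cons]
      have h0 : pvStepA (x :: y :: t) d 0 = pvStepP d (x, y) := by
        simp [pvStepA, pvStepP, pvBump, PySem.List.pyGetD]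
      rw [h0, hlen]
      have e01 : (0 : Int) + 1 = 1 := by norm_num
      have ec : ((t.length + 1 : Nat) : Int) = ((t.length : Nat) : Int) + 1 := by push_cast; ring
      rw [e01, ec, pvShift]
      have hih := ih (pvStepP d (x, y))
      have ht : (((y :: t).length : Nat) : Int) - 1 = ((t.length : Nat) : Int) := by
        simp only [List.length_cons]; push_cast; ring
      rw [ht] at hih
      rw [hih]
      rfl

-- one non-negative run: counting its pairs, then continuing past the delimiter
theorem pvRun_split (xs : List Int) : ∀ (x : Int) (d : PySem.Dict (Int × Int) Int), 0 ≤ x →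
    ((x :: xs).zip (x :: xs).tail).foldl pvStepP d
      = ((xs.dropWhile (fun t => !decide (t < 0))).zip (xs.dropWhile (fun t => !decide (t < 0))).tail).foldl pvStepP
          (pvCountRun d (x :: xs.takeWhile (fun t => !decide (t < 0)))) := by
  induction xs with
  | nil => intro x d _; simp [pvCountRun]
  | cons y t ih =>
    intro x d hx
    by_cases hy : y < 0
    · simp only [List.takeWhile, List.dropWhile, hy, decide_true, Bool.not_true]
      have hstep : pvStepP d (x, y) = d := by simp [pvStepP, hy]
      simp [pvCountRun, List.zip, hstep]
    · rw [not_lt] at hy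
      simp only [List.takeWhile, List.dropWhile]
      have hdy : decide (y < 0) = false := by simp; omega
      rw [hdy]
      simp only [Bool.not_false]
      have hstep : pvStepP d (x, y) = pvBump d (x, y) := by
        simp [pvStepP]; omega
      have lhs1 : ((x :: y :: t).zip (x :: y :: t).tail).foldl pvStepP d
          = ((y :: t).zip (y :: t).tail).foldl pvStepP (pvBump d (x, y)) := by
        rw [← hstep]; rfl
      rw [lhs1, ih y (pvBump d (x, y)) hy]
      rfl

-- B's fold over the runs is the same fold of pvStepP over the adjacent pairs
theorem pvB_runs (tokens : List Int) :
    ∀ d, (pvRuns tokens).foldl pvCountRun d = (tokens.zip tokens.tail).foldl pvStepP d := by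
  fun_induction pvRuns tokens with
  | case1 => intro d; simp
  | case2 x xs hx ih =>
    intro d
    cases xs with
    | nil => simp [pvRuns]
    | cons y t =>
      have hstep : pvStepP d (x, y) = d := by simp [pvStepP, hx]
      have h2 : ((x :: y :: t).zip (x :: y :: t).tail).foldl pvStepP d
          = ((y :: t).zip (y :: t).tail).foldl pvStepP (pvStepP d (x, y)) := rfl
      rw [ih d, h2, hstep]
  | case3 x xs hx ih =>
    intro d
    rw [not_lt] at hx
    rw [List.foldl_cons, ih, ← pvRun_split xs x d hx]

-- ===== VERDICT (by name: the statement is the Claim_ definition above) =====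
theorem get_pair_counts_spec : Claim_equal_get_pair_counts := by
  intro tokens _
  unfold Spec_get_pair_counts get_pair_counts get_pair_counts_alt
  rw [pvA_loop, pvB_runs]
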